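-- pv_equiv track=rewrite | github.com/stokrotka24/algorithms-and-data-structures | List4/task1_task2/BSTConfig.py | clear_value
-- ===== SOURCE A (Python) =====
-- def clear_value(value):
--     first = 0
--
--     while not value[first].isalpha():
--         first += 1
--
--     last = len(value) - 1
--     while not value[last].isalpha():
--         last -= 1
--
--     return value[first: last + 1]
-- ===== SOURCE B (Python) =====
-- def clear_value(value):
--     idx = [i for i, c in enumerate(value) if c.isalpha()]
--     return value[idx[0]: idx[-1] + 1]
-- ===== Notes on version B (the rewrite author's own statement) =====
-- stated objective: simpler
-- what changed: A scans inward from each end with two while loops; B makes one full pass collecting the indices of alphabetic characters and slices between the first and last recorded index.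
import Mathlib
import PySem

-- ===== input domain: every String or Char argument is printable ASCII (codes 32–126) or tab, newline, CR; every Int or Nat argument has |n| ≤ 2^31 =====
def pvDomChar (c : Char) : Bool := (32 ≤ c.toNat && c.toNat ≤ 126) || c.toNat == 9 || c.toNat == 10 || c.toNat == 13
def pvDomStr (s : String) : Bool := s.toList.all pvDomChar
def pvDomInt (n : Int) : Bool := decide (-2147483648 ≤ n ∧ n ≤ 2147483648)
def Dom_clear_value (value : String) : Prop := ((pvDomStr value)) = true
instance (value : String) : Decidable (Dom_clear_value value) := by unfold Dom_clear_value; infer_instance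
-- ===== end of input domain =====

-- B replaces A's two inward end-scans with one full pass collecting alphabetic indices, then one slice.

-- ===== PORT A =====
-- 'while not value[first].isalpha(): first += 1' (Python raises IndexError when first
-- runs past the end; that input is excluded by Pre_, the out-of-range branch is never reached there)
def clearFirstLoop (cs : List Char) (first : Nat) : Nat :=
  if h : first < cs.length then
    if PySem.Chars.isalpha cs[first] then first else clearFirstLoop cs (first + 1)
  else first
termination_by cs.length - first

-- 'while not value[last].isalpha(): last -= 1' (Python would wrap at -1; under Pre_ the
-- loop stops at an alphabetic index before reaching below 0, so the 0-branch default is never reached)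
def clearLastLoop (cs : List Char) (last : Nat) : Nat :=
  if _h : last < cs.length then
    if PySem.Chars.isalpha cs[last] then last
    else
      match last with
      | 0 => 0
      | k + 1 => clearLastLoop cs k
  else last

def clear_value (value : String) : String :=
  let cs := value.toList
  let first := clearFirstLoop cs 0
  let last := clearLastLoop cs (cs.length - 1)
  String.ofList (PySem.List.slice cs (some (first : Int)) (some ((last : Int) + 1)))

-- ===== PORT B =====
-- idx = [i for i, c in enumerate(value) if c.isalpha()]; return value[idx[0]: idx[-1] + 1]
-- (idx[0] / idx[-1] raise IndexError on an empty idx: the none branch, excluded by Pre_)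
def clear_value_alt (value : String) : String :=
  let cs := value.toList
  let idx := ((PySem.List.enumerate cs 0).filter (fun p => PySem.Chars.isalpha p.2)).map (·.1)
  match PySem.List.pyGet? idx 0, PySem.List.pyGet? idx (-1) with
  | some f, some l => String.ofList (PySem.List.slice cs (some f) (some (l + 1)))
  | _, _ => ""

-- ===== PRECONDITION & SPEC =====
-- A raises IndexError exactly when the string has no alphabetic character (first runs past the end).
def Pre_clear_value (value : String) : Prop :=
  value.toList.any PySem.Chars.isalpha = true
instance (value : String) : Decidable (Pre_clear_value value) := by
  unfold Pre_clear_value; infer_instance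

def pvWitness_clear_value : String := " ab! "

def Spec_clear_value (value : String) (out : String) : Prop := out = clear_value_alt value
instance (value : String) (out : String) : Decidable (Spec_clear_value value out) := by
  unfold Spec_clear_value; infer_instance

-- ===== CLAIM (what is proved, stated in full; the proofs are below) =====
def Claim_equal_clear_value : Prop :=
  ∀ (value : String), Dom_clear_value value → Pre_clear_value value →
    Spec_clear_value value (clear_value value)

-- ===== LEMMAS AND PROOFS =====

-- the index list B builds, starting enumeration at s
def idxOf (cs : List Char) (s : Int) : List Int :=
  ((PySem.List.enumerate cs s).filter (fun p => PySem.Chars.isalpha p.2)).map (·.1)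

theorem idxOf_nil (s : Int) : idxOf [] s = [] := by
  simp [idxOf, PySem.List.enumerate_nil]

theorem idxOf_cons (c : Char) (cs : List Char) (s : Int) :
    idxOf (c :: cs) s =
      (if PySem.Chars.isalpha c then [s] else []) ++ idxOf cs (s + 1) := by
  by_cases h : PySem.Chars.isalpha c <;>
    simp [idxOf, PySem.List.enumerate_cons, h]

theorem idxOf_eq_nil_of_no_alpha (cs : List Char) (s : Int)
    (h : cs.any PySem.Chars.isalpha = false) : idxOf cs s = [] := by
  induction cs generalizing s with
  | nil => exact idxOf_nil s
  | cons c cs ih =>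
    simp only [List.any_cons, Bool.or_eq_false_iff] at h
    simp [idxOf_cons, h.1, ih (s + 1) h.2]

-- shift lemma for A's first loop
theorem clearFirstLoop_cons_succ (c : Char) (cs : List Char) (i : Nat) :
    clearFirstLoop (c :: cs) (i + 1) = clearFirstLoop cs i + 1 := by
  have key : ∀ n i, cs.length - i ≤ n →
      clearFirstLoop (c :: cs) (i + 1) = clearFirstLoop cs i + 1 := by
    intro n
    induction n with
    | zero =>
      intro i hi
      have hlen : cs.length ≤ i := by omega
      conv_lhs => rw [clearFirstLoop.eq_def]
      conv_rhs => rw [clearFirstLoop.eq_def]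
      rw [dif_neg (show ¬ i + 1 < (c :: cs).length by simp; omega), dif_neg (by omega)]
    | succ n ih =>
      intro i hi
      by_cases hlt : i < cs.length
      · conv_lhs => rw [clearFirstLoop.eq_def]
        conv_rhs => rw [clearFirstLoop.eq_def]
        rw [dif_pos (show i + 1 < (c :: cs).length by simp; omega), dif_pos hlt]
        have hget : (c :: cs)[i + 1]'(by simp; omega) = cs[i] := by simp
        rw [hget]
        by_cases ha : PySem.Chars.isalpha cs[i]
        · simp [ha]
        · simp only [ha, Bool.false_eq_true, if_false]
          exact ih (i + 1) (by omega)
      · conv_lhs => rw [clearFirstLoop.eq_def]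
        conv_rhs => rw [clearFirstLoop.eq_def]
        rw [dif_neg (show ¬ i + 1 < (c :: cs).length by simp; omega), dif_neg hlt]
  exact key (cs.length - i) i le_rfl

-- B's first recorded index is the index A's first loop stops at
theorem idxOf_head (cs : List Char) (s : Int)
    (h : cs.any PySem.Chars.isalpha = true) :
    (idxOf cs s).head? = some (s + (clearFirstLoop cs 0 : Int)) := by
  induction cs generalizing s with
  | nil => simp at h
  | cons c cs ih =>
    by_cases ha : PySem.Chars.isalpha c
    · have h0 : clearFirstLoop (c :: cs) 0 = 0 := by
        rw [clearFirstLoop, dif_pos (by simp)]; simp [ha]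
      simp [idxOf_cons, ha, h0]
    · have htail : cs.any PySem.Chars.isalpha = true := by
        simpa [ha] using h
      have h0 : clearFirstLoop (c :: cs) 0 = clearFirstLoop cs 0 + 1 := by
        rw [clearFirstLoop.eq_def, dif_pos (by simp)]
        simpa [ha] using clearFirstLoop_cons_succ c cs 0
      rw [idxOf_cons, if_neg ha, List.nil_append, ih (s + 1) htail, h0]
      congr 1
      push_cast
      ring

-- shift lemma for A's last loop: valid as long as an alphabetic index ≤ i exists in cs
theorem clearLastLoop_cons_succ (c : Char) (cs : List Char) (i : Nat)
    (hex : ∃ j, ∃ hj : j < cs.length, j ≤ i ∧ PySem.Chars.isalpha cs[j]) :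
    clearLastLoop (c :: cs) (i + 1) = clearLastLoop cs i + 1 := by
  induction i with
  | zero =>
    obtain ⟨j, hj, hji, hja⟩ := hex
    have hj0 : j = 0 := by omega
    subst hj0
    conv_lhs => rw [clearLastLoop.eq_def]
    conv_rhs => rw [clearLastLoop.eq_def]
    rw [dif_pos (show 0 + 1 < (c :: cs).length by simp; omega), dif_pos hj]
    have hget : (c :: cs)[0 + 1]'(by simp; omega) = cs[0] := by simp
    rw [hget]
    simp [hja]
  | succ k ih =>
    by_cases hlt : k + 1 < cs.length
    · conv_lhs => rw [clearLastLoop.eq_def]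
      conv_rhs => rw [clearLastLoop.eq_def]
      rw [dif_pos (show k + 1 + 1 < (c :: cs).length by simp; omega), dif_pos hlt]
      have hget : (c :: cs)[k + 1 + 1]'(by simp; omega) = cs[k + 1] := by
        simp
      rw [hget]
      by_cases ha : PySem.Chars.isalpha cs[k + 1]
      · simp [ha]
      · simp only [ha, Bool.false_eq_true, if_false]
        apply ih
        obtain ⟨j, hj, hji, hja⟩ := hex
        have : j ≠ k + 1 := by rintro rfl; exact ha hja
        exact ⟨j, hj, by omega, hja⟩
    · conv_lhs => rw [clearLastLoop.eq_def]
      conv_rhs => rw [clearLastLoop.eq_def]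
      rw [dif_neg (show ¬ k + 1 + 1 < (c :: cs).length by simp; omega), dif_neg hlt]
  -- (the i = 0 non-alpha wrap branch is never reached: hex pins an alpha at 0)

-- when cs has no alpha but c does, A's last loop walks down to 0
theorem clearLastLoop_cons_zero (c : Char) (cs : List Char)
    (hc : PySem.Chars.isalpha c) (h : cs.any PySem.Chars.isalpha = false) :
    ∀ i, i ≤ cs.length → clearLastLoop (c :: cs) i = 0 := by
  intro i
  induction i with
  | zero =>
    intro _
    rw [clearLastLoop.eq_def, dif_pos (by simp)]
    simp [hc]
  | succ k ih =>
    intro hk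
    rw [clearLastLoop.eq_def,
      dif_pos (show k + 1 < (c :: cs).length by simp; omega)]
    have hget : (c :: cs)[k + 1]'(by simp; omega) = cs[k]'(by omega) := by simp
    rw [hget]
    have hna : ¬ PySem.Chars.isalpha (cs[k]'(by omega)) := by
      intro hca
      have : cs.any PySem.Chars.isalpha = true :=
        List.any_eq_true.2 ⟨cs[k]'(by omega), List.getElem_mem _, hca⟩
      simp [h] at this
    simp only [hna, Bool.false_eq_true, if_false]
    exact ih (by omega)

-- B's last recorded index is the index A's last loop stops at
theorem idxOf_getLast (cs : List Char) (s : Int)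
    (h : cs.any PySem.Chars.isalpha = true) :
    (idxOf cs s).getLast? = some (s + (clearLastLoop cs (cs.length - 1) : Int)) := by
  induction cs generalizing s with
  | nil => simp at h
  | cons c cs ih =>
    by_cases htail : cs.any PySem.Chars.isalpha = true
    · -- the tail still holds an alpha: the last index lives in the tail part
      have hidx : idxOf cs (s + 1) ≠ [] := by
        intro hnil
        have := idxOf_head cs (s + 1) htail
        simp [hnil] at this
      have hshift : clearLastLoop (c :: cs) (cs.length - 1 + 1) =
          clearLastLoop cs (cs.length - 1) + 1 := by
        apply clearLastLoop_cons_succ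
        obtain ⟨x, hx, hxa⟩ := List.any_eq_true.1 htail
        obtain ⟨j, hj, rfl⟩ := List.getElem_of_mem hx
        exact ⟨j, hj, by omega, hxa⟩
      have hpos : 0 < cs.length := by
        rcases List.any_eq_true.1 htail with ⟨x, hx, _⟩
        exact List.length_pos_of_mem hx
      have hlen : (c :: cs).length - 1 = cs.length - 1 + 1 := by
        simp only [List.length_cons]
        omega
      rw [hlen, hshift]
      have hlast : (idxOf (c :: cs) s).getLast? = (idxOf cs (s + 1)).getLast? := by
        rw [idxOf_cons, List.getLast?_append_of_ne_nil _ hidx]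
      rw [hlast, ih (s + 1) htail]
      congr 1
      push_cast
      ring
    · -- only the head is alphabetic
      have hc : PySem.Chars.isalpha c := by
        simp only [List.any_cons, Bool.or_eq_true] at h
        rcases h with h | h
        · exact h
        · simp [h] at htail
      have hF : cs.any PySem.Chars.isalpha = false := by
        simpa using htail
      have hzero : clearLastLoop (c :: cs) ((c :: cs).length - 1) = 0 := by
        apply clearLastLoop_cons_zero c cs hc hF
        simp
      rw [hzero, idxOf_cons, if_pos hc, idxOf_eq_nil_of_no_alpha cs (s + 1) hF]
      simp

theorem idxOf_ne_nil (cs : List Char) (s : Int)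
    (h : cs.any PySem.Chars.isalpha = true) : idxOf cs s ≠ [] := by
  intro hnil
  have := idxOf_head cs s h
  simp [hnil] at this

-- ===== VERDICT (by name: the statement is the Claim_ definition above) =====
theorem clear_value_spec : Claim_equal_clear_value := by
  intro value _hdom hpre
  unfold Spec_clear_value clear_value clear_value_alt
  have h : value.toList.any PySem.Chars.isalpha = true := hpre
  set cs := value.toList with hcs
  have hhead := idxOf_head cs 0 h
  have hlastl := idxOf_getLast cs 0 h
  have hne := idxOf_ne_nil cs 0 h
  have hget0 : PySem.List.pyGet? (idxOf cs 0) 0 =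
      some ((clearFirstLoop cs 0 : Int)) := by
    rw [PySem.List.pyGet?_zero, ← List.head?_eq_getElem?, hhead]
    norm_num
  have hgetm1 : PySem.List.pyGet? (idxOf cs 0) (-1) =
      some ((clearLastLoop cs (cs.length - 1) : Int)) := by
    rw [PySem.List.pyGet?_neg_one, hlastl]
    norm_num
  have heq : ((PySem.List.enumerate cs 0).filter (fun p => PySem.Chars.isalpha p.2)).map
      (·.1) = idxOf cs 0 := rfl
  simp only [heq, hget0, hgetm1]
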